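-- pv_equiv track=rewrite | github.com/davidwallacejackson/code_monkey | code_monkey/utils.py | find_termination
-- ===== SOURCE A (Python) =====
-- class TerminationNotFoundException(Exception):
--     def __init__(self, lines, start_column, start_line, terminating_char):
--         error_message = "terminating character {} was not found\n".format(
--             terminating_char)
--         error_message += "scan started at {}, {} in source: {}".format(
--             start_column,
--             start_line,
--             ''.join(lines))
--
--         super(Exception, self).__init__(error_message)
--
-- def findnth(haystack, needle, n):
--     #snippet from: http://stackoverflow.com/questions/1883980/find-the-nth-occurrence-of-substring-in-a-string
--     parts = haystack.split(needle, n+1)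
--     if len(parts) <= (n + 1):
--         return - 1
--     return len(haystack)-len(parts[-1])-len(needle)
--
-- def line_column_to_absolute_index(text, line, column):
--     '''Given line and column numbers (0-indexed) for a string text, return the
--     corresponding index in the entire string.'''
--
--     if line < 0:
--         raise ValueError("Negative line index {} is invalid.".format(
--             line))
--
--     total_lines = text.count('\n')
--
--     if line > total_lines:
--         raise ValueError(
--             "Asked for line {} (0-indexed), but string has only {} lines".format(
--                 line, total_lines + 1))
--
--
--     if line == 0:
--         line_start_index = 0
--     else:
--         #finding the nth newline gets you the position before the first column
--         #of a line -- we actually want the first column of the line to be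
--         #"column 0"
--         line_start_index = findnth(text, '\n', line - 1) + 1
--
--     return line_start_index + column
--
-- def find_termination(lines, start_line, start_column, terminating_char):
--     '''Walk back through lines starting from start_line, start_column, and
--     return the index at which terminating_char first appears, disregarding
--     anything on a line that is part of a comment. Again, the scan is BACKWARDS
--     -- so the result will be before start_line, start_column in the source file.
--
--     Raises an exception if the terminating_char is not found.
--
--     The intended use is to find the end of a construct whose bounds are not
--     necessaily determined by the placement of its children -- anything inside
--     parentheses or brackets, where Python disregards whitespace.'''
--
--     #the last line to scan (remember, backwards!)
--     file_line_limit = 0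
--
--     lines_to_scan = lines[file_line_limit:(start_line + 1)]
--
--     #trim the last line so that we don't include any of the sibling
--     lines_to_scan[-1] = lines_to_scan[-1][0:start_column+1]
--
--     #scan through the lines in reverse order, looking for the end of the node
--
--     #len(lines_to_scan) - (line_index + 1) is the index of a line in
--     #lines_to_scan -- basically, it takes us from the 'reversed' indices that we
--     #get in line_index back to real, from-the-beginning indices
--     for line_index, line in enumerate(reversed(lines_to_scan)):
--
--         #remove comments from line
--         if '#' in line:
--             line = line[0:line.find('#')]
--
--         for char_index, char in enumerate(reversed(line)):
--             if char == terminating_char: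
--                 line_index_in_file = file_line_limit + \
--                     len(lines_to_scan) - (line_index + 1)
--                 char_index_in_line = len(line) - char_index
--                 return line_column_to_absolute_index(
--                     ''.join(lines),
--                     line_index_in_file,
--                     char_index_in_line)
--
--     #we didn't find anything!
--     raise TerminationNotFoundException(
--         lines,
--         start_line,
--         start_column,
--         terminating_char)
-- ===== SOURCE B (Python) =====
-- class TerminationNotFoundException(Exception):
--     def __init__(self, lines, start_column, start_line, terminating_char):
--         error_message = "terminating character {} was not found\n".format(
--             terminating_char)
--         error_message += "scan started at {}, {} in source: {}".format(
--             start_column,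
--             start_line,
--             ''.join(lines))
--         super(Exception, self).__init__(error_message)
--
--
-- def find_termination(lines, start_line, start_column, terminating_char):
--     '''Single forward pass: precompute line-start offsets from the newline
--     positions of the joined source, strip each scanned line at its first '#',
--     locate the terminating char with rfind, and keep the last hit.'''
--     text = ''.join(lines)
--     offsets = [0]
--     for i, ch in enumerate(text):
--         if ch == '\n':
--             offsets.append(i + 1)
--     scan = lines[0:start_line + 1]
--     scan[-1] = scan[-1][0:start_column + 1]
--     best = None
--     for idx, line in enumerate(scan):
--         hash_pos = line.find('#')
--         if hash_pos != -1:
--             line = line[:hash_pos]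
--         pos = line.rfind(terminating_char)
--         if pos != -1:
--             best = offsets[idx] + pos + 1
--     if best is None:
--         raise TerminationNotFoundException(
--             lines, start_line, start_column, terminating_char)
--     return best
-- ===== Notes on version B (the rewrite author's own statement) =====
-- stated objective: alternative
-- what changed: Replaces the backward line-by-line scan with its per-hit split-based findnth/count recomputation by a single forward pass that precomputes all line-start offsets from the newline positions of the joined source once, strips each line at its first '#', finds the terminating char with rfind and keeps the last hit's absolute offset.
import Mathlib
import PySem

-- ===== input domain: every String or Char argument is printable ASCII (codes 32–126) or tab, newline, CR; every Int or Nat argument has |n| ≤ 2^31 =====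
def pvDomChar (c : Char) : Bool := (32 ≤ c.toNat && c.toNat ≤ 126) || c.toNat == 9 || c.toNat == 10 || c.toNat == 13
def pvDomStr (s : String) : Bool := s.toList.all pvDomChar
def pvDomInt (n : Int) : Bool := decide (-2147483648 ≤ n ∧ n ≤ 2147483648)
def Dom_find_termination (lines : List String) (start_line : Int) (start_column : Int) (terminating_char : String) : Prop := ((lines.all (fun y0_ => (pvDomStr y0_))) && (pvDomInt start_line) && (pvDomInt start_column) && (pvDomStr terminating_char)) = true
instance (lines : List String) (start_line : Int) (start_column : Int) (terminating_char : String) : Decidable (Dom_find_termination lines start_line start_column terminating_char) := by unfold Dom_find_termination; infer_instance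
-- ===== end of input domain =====

-- B re-implements the backward comment-aware scan as one forward pass over precomputed
-- line-start offsets (from the newline positions of the joined source) with rfind,
-- keeping the last hit; equivalence of the return value is proved on Pre_ (exactly the
-- inputs where A returns instead of raising).

-- ===== PORT A =====

def findnthA (haystack needle : String) (n : Int) : Int :=
  match PySem.Str.splitMax? haystack needle (n + 1) with
  | none => 0          -- str.split("") raises ValueError; A only ever passes "\n" here
  | some parts =>
    if (parts.length : Int) ≤ n + 1 then -1
    else PySem.Str.len haystack - PySem.Str.len (parts.getLastD "") - PySem.Str.len needle

def lineColumnToAbsoluteIndexA (text : String) (line : Int) (column : Int) : Int :=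
  if line < 0 then 0   -- raise ValueError: excluded by Pre_
  else
    if line > (PySem.Str.count text "\n" : Int) then 0   -- raise ValueError: excluded by Pre_
    else
      (if line = 0 then 0 else findnthA text "\n" (line - 1) + 1) + column

-- for char_index, char in enumerate(reversed(line)): first char equal to terminating_char
def scanCharsA (tc : String) (linelen : Int) : List (Char × Nat) → Option Int
  | [] => none
  | (c, ci) :: rest =>
    if String.ofList [c] = tc then some (linelen - (ci : Int)) else scanCharsA tc linelen rest

-- for line_index, line in enumerate(reversed(lines_to_scan)): …
def scanLinesA (textAll : String) (nscan : Int) (tc : String) : List (String × Nat) → Option Int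
  | [] => none
  | (line, li) :: rest =>
    let line' := if PySem.Str.isIn "#" line then
        PySem.Str.slice line none (some (PySem.Str.find line "#")) else line
    match scanCharsA tc (PySem.Str.len line') line'.toList.reverse.zipIdx with
    | some col => some (lineColumnToAbsoluteIndexA textAll (nscan - ((li : Int) + 1)) col)
    | none => scanLinesA textAll nscan tc rest

def find_termination (lines : List String) (start_line : Int) (start_column : Int) (terminating_char : String) : Int :=
  let lines_to_scan := PySem.List.slice lines (some 0) (some (start_line + 1))
  match lines_to_scan.getLast? with
  | none => 0          -- lines_to_scan[-1] raises IndexError: excluded by Pre_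
  | some lastLine =>
    let scan2 := lines_to_scan.dropLast ++ [PySem.Str.slice lastLine none (some (start_column + 1))]
    match scanLinesA (PySem.Str.join "" lines) (scan2.length : Int) terminating_char scan2.reverse.zipIdx with
    | some r => r
    | none => 0        -- raise TerminationNotFoundException: excluded by Pre_

-- ===== PORT B =====

def find_termination_alt (lines : List String) (start_line : Int) (start_column : Int) (terminating_char : String) : Int :=
  let text := PySem.Str.join "" lines
  let offsets : List Int :=
    text.toList.zipIdx.foldl (fun acc p => if p.1 = '\n' then acc ++ [(p.2 : Int) + 1] else acc) [0]
  let scan := PySem.List.slice lines (some 0) (some (start_line + 1))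
  match scan.getLast? with
  | none => 0          -- scan[-1] raises IndexError, as in the Python
  | some lastLine =>
    let scan2 := scan.dropLast ++ [PySem.Str.slice lastLine none (some (start_column + 1))]
    let best := scan2.zipIdx.foldl (fun best p =>
      let hpos := PySem.Str.find p.1 "#"
      let line := if hpos ≠ -1 then PySem.Str.slice p.1 none (some hpos) else p.1
      let pos := PySem.Str.rfind line terminating_char
      if pos ≠ -1 then some (PySem.List.pyGetD offsets (p.2 : Int) 0 + pos + 1) else best) none
    match best with
    | some r => r
    | none => 0        -- raise TerminationNotFoundException

-- ===== PRECONDITION & SPEC =====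

-- the comment-stripped part of a line: everything before the first '#'
def pvStrip (l : List Char) : List Char := l.takeWhile (fun c => c != '#')

-- the lines A scans: lines[0:start_line+1] with the last one cut at start_column+1
def pvScan (lines : List String) (start_line : Int) (start_column : Int) : List (List Char) :=
  match (PySem.List.slice lines (some 0) (some (start_line + 1))).getLast? with
  | none => []
  | some lastLine =>
    ((PySem.List.slice lines (some 0) (some (start_line + 1))).dropLast.map String.toList)
      ++ [PySem.Chars.slice lastLine.toList none (some (start_column + 1))]

-- terminating_char is a single char occurring in the comment-stripped line
def pvMatches (tc : String) (l : List Char) : Bool :=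
  match tc.toList with
  | [c] => (pvStrip l).contains c
  | _ => false

-- Pre_ admits exactly the inputs on which A returns: the scanned slice is nonempty,
-- the terminating char occurs in it outside comments, and the line of the last
-- occurrence does not exceed the newline count of the joined source (otherwise A's
-- line_column_to_absolute_index raises ValueError).
def Pre_find_termination (lines : List String) (start_line : Int) (start_column : Int) (terminating_char : String) : Prop :=
  pvScan lines start_line start_column ≠ [] ∧
  (pvScan lines start_line start_column).any (pvMatches terminating_char) = true ∧
  (pvScan lines start_line start_column).length - 1 -
      (pvScan lines start_line start_column).reverse.findIdx (pvMatches terminating_char)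
    ≤ ((lines.map String.toList).flatten).count '\n'

instance (lines : List String) (start_line : Int) (start_column : Int) (terminating_char : String) : Decidable (Pre_find_termination lines start_line start_column terminating_char) := by unfold Pre_find_termination; infer_instance

def pvWitness_find_termination : List String × Int × Int × String := (["x)\n", "y\n"], 0, 1, ")")

def Spec_find_termination (lines : List String) (start_line : Int) (start_column : Int) (terminating_char : String) (out : Int) : Prop := out = find_termination_alt lines start_line start_column terminating_char
instance (lines : List String) (start_line : Int) (start_column : Int) (terminating_char : String) (out : Int) : Decidable (Spec_find_termination lines start_line start_column terminating_char out) := by unfold Spec_find_termination; infer_instance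

-- ===== CLAIM (what is proved, stated in full; the proofs are below) =====
def Claim_equal_find_termination : Prop := ∀ (lines : List String) (start_line : Int) (start_column : Int) (terminating_char : String), Dom_find_termination lines start_line start_column terminating_char → Pre_find_termination lines start_line start_column terminating_char → Spec_find_termination lines start_line start_column terminating_char (find_termination lines start_line start_column terminating_char)

-- ===== LEMMAS AND PROOFS =====

-- positions of '\n' in a character list, in order
def nlPos : List Char → List Nat
  | [] => []
  | c :: rest => if c = '\n' then 0 :: (nlPos rest).map (· + 1) else (nlPos rest).map (· + 1)

theorem length_nlPos (cs : List Char) : (nlPos cs).length = cs.count '\n' := by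
  induction cs with
  | nil => simp [nlPos]
  | cons c rest ih =>
    by_cases h : c = '\n' <;> simp [nlPos, h, List.count_cons, ih] <;> omega

theorem nlPos_lt_length (cs : List Char) (k : Nat) (hk : k < (nlPos cs).length) :
    (nlPos cs).getD k 0 < cs.length := by
  induction cs generalizing k with
  | nil => simp [nlPos] at hk
  | cons c rest ih =>
    by_cases h : c = '\n'
    · simp [nlPos, h] at hk ⊢
      cases k with
      | zero => simp
      | succ k =>
        have hk' : k < (nlPos rest).length := by omega
        have := ih k hk'
        simp [List.getD_eq_getElem?_getD, List.getElem?_eq_getElem hk'] at this ⊢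
        omega
    · simp [nlPos, h] at hk ⊢
      have := ih k hk
      simp [List.getD_eq_getElem?_getD, List.getElem?_eq_getElem hk] at this ⊢
      omega

theorem join_toList (lines : List String) :
    (PySem.Str.join "" lines).toList = (lines.map String.toList).flatten := by
  rw [PySem.Str.toList_join]
  show PySem.Chars.join "".toList _ = _
  have : "".toList = ([] : List Char) := rfl
  rw [this]
  unfold PySem.Chars.join
  generalize (lines.map String.toList) = xs
  induction xs with
  | nil => simp [List.intercalate]
  | cons x xs ih => cases xs <;> simp_all [List.intercalate, List.intersperse]

theorem count_go_singleton (c : Char) (cs : List Char) (fuel acc : Nat) (h : cs.length ≤ fuel) :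
    PySem.Chars.count.go [c] fuel cs acc = acc + cs.count c := by
  induction cs generalizing fuel acc with
  | nil => cases fuel <;> simp [PySem.Chars.count.go]
  | cons x rest ih =>
    cases fuel with
    | zero => simp at h
    | succ f =>
      have hf : rest.length ≤ f := by simp at h; omega
      by_cases hx : x = c
      · simp [PySem.Chars.count.go, List.isPrefixOf, hx, ih _ _ hf, List.count_cons]
        omega
      · have : ([c].isPrefixOf (x :: rest)) = false := by
          simp [List.isPrefixOf]; exact fun h => absurd h.symm hx
        simp [PySem.Chars.count.go, this, ih _ _ hf, List.count_cons, hx]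

theorem count_singleton (cs : List Char) (c : Char) :
    PySem.Chars.count cs [c] = cs.count c := by
  unfold PySem.Chars.count
  simp [count_go_singleton c cs cs.length 0 le_rfl]

theorem singleton_infix_iff (c : Char) (l : List Char) : ([c] <:+: l) ↔ c ∈ l := by
  constructor
  · intro h; exact h.mem (by simp)
  · intro h
    obtain ⟨i, hi, rfl⟩ := List.getElem_of_mem h
    exact ⟨l.take i, l.drop (i+1), by simp⟩

theorem singleton_prefix_iff (c : Char) (l : List Char) : ([c] <+: l) ↔ l.head? = some c := by
  cases l with
  | nil => simp
  | cons x t => simp [List.cons_prefix_cons, eq_comm]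

theorem takeWhile_eq_take_of (p : Char → Bool) (l : List Char) (k : Nat) (hk : k < l.length)
    (hbefore : ∀ i, (h : i < k) → p (l[i]'(by omega)) = true) (hat : p (l[k]'hk) = false) :
    l.takeWhile p = l.take k := by
  induction l generalizing k with
  | nil => simp at hk
  | cons x t ih =>
    cases k with
    | zero => simp at hat; simp [List.takeWhile_cons, hat]
    | succ k =>
      have hx : p x = true := hbefore 0 (by omega)
      simp [List.takeWhile_cons, hx]
      exact ih k (by simpa using hk) (fun i h => hbefore (i+1) (by omega)) hat

theorem strip_eq_pvStrip (l : List Char) :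
    (if PySem.Chars.find l ['#'] ≠ -1 then
        PySem.Chars.slice l none (some (PySem.Chars.find l ['#'])) else l) = pvStrip l := by
  by_cases h : '#' ∈ l
  · have hne : PySem.Chars.find l ['#'] ≠ -1 := by
      rw [PySem.Chars.find_ne_neg_one_iff, singleton_infix_iff]; exact h
    have h0 : 0 ≤ PySem.Chars.find l ['#'] := by
      rw [PySem.Chars.find_nonneg_iff, singleton_infix_iff]; exact h
    obtain ⟨hp, hmin⟩ := PySem.Chars.find_spec (s := l) (sub := ['#']) h0
    rw [if_pos hne, PySem.Chars.slice_eq_listSlice, PySem.List.slice_to (hb := h0)]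
    set k := (PySem.Chars.find l ['#']).toNat with hk
    have hklen : k < l.length := by
      by_contra hge
      push_neg at hge
      rw [List.drop_eq_nil_of_le hge] at hp
      simp [singleton_prefix_iff] at hp
    rw [pvStrip, takeWhile_eq_take_of _ _ k hklen]
    · intro i hi
      have := hmin i (by omega)
      rw [singleton_prefix_iff] at this
      simp [List.head?_drop, List.getElem?_eq_getElem (by omega : i < l.length)] at this
      simpa using this
    · rw [singleton_prefix_iff] at hp
      simp [List.head?_drop, List.getElem?_eq_getElem hklen] at hp
      simp [hp]
  · have hm : PySem.Chars.find l ['#'] = -1 := by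
      rw [PySem.Chars.find_eq_neg_one_iff, singleton_infix_iff]; exact h
    simp only [hm, ne_eq, not_true_eq_false, if_false, pvStrip]
    rw [List.takeWhile_eq_self_iff.mpr]
    intro x hx
    simp only [bne_iff_ne, ne_eq]
    rintro rfl; exact h hx

theorem rfind_go_spec (l : List Char) (c : Char) (j : Nat) (hj : j < l.length) :
    PySem.Chars.rfind.go l [c] j =
      match (l.take (j+1)).reverse.findIdx? (· == c) with
      | none => -1
      | some k => (j : Int) - k := by
  induction j with
  | zero =>
    cases l with
    | nil => simp at hj
    | cons x t =>
      have : PySem.Chars.rfind.go (x :: t) [c] 0 = if [c].isPrefixOf (x :: t) then 0 else -1 := by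
        simp [PySem.Chars.rfind.go]
      rw [this]
      have hpre : ([c].isPrefixOf (x :: t)) = (c == x) := by simp [List.isPrefixOf]
      rw [hpre]
      by_cases hx : x = c
      · subst hx; simp [List.findIdx?_cons]
      · rw [if_neg (by simpa using Ne.symm hx)]
        simp [List.findIdx?_cons, hx]
  | succ j ih =>
    have hjl : j < l.length := by omega
    have hget : l[j+1]? = some (l[j+1]'hj) := List.getElem?_eq_getElem hj
    have htake : l.take (j+2) = l.take (j+1) ++ [l[j+1]'hj] := by
      rw [List.take_add_one, hget]; rfl
    have hdrop : (l.drop (j+1)).head? = some (l[j+1]'hj) := by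
      simp [List.head?_drop, hget]
    have hpref : ([c].isPrefixOf (l.drop (j+1))) = (l[j+1]'hj == c) := by
      cases hd : l.drop (j+1) with
      | nil => simp [hd] at hdrop
      | cons y ys =>
        simp [hd] at hdrop
        simp [List.isPrefixOf, hdrop, eq_comm]
    rw [show PySem.Chars.rfind.go l [c] (j+1) =
        if [c].isPrefixOf (l.drop (j+1)) then ((j:Int)+1) else PySem.Chars.rfind.go l [c] j by
      simp [PySem.Chars.rfind.go]]
    rw [htake, hpref]
    by_cases hc : l[j+1]'hj = c
    · simp [hc, List.findIdx?_cons]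
    · rw [if_neg (by simpa using hc), ih hjl]
      simp only [List.reverse_append, List.reverse_cons, List.reverse_nil, List.nil_append,
        List.cons_append, List.findIdx?_cons, beq_iff_eq, if_neg hc]
      cases hfi : (l.take (j+1)).reverse.findIdx? (· == c) <;> simp [hfi] <;> push_cast <;> ring

theorem rfind_singleton (l : List Char) (c : Char) :
    PySem.Chars.rfind l [c] =
      match l.reverse.findIdx? (· == c) with
      | none => -1
      | some k => (l.length : Int) - 1 - k := by
  unfold PySem.Chars.rfind
  cases hl : l with
  | nil => simp [PySem.Chars.rfind.go, List.isPrefixOf]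
  | cons x t =>
    rw [← hl]
    have hlen : l.length = (l.length - 1) + 1 := by subst hl; simp
    have hstep : PySem.Chars.rfind.go l [c] l.length = PySem.Chars.rfind.go l [c] (l.length - 1) := by
      rw [hlen]
      have : ([c].isPrefixOf (l.drop (l.length - 1 + 1))) = false := by
        rw [← hlen, List.drop_length]; rfl
      simp [PySem.Chars.rfind.go, this]
    rw [hstep, rfind_go_spec l c (l.length - 1) (by subst hl; simp)]
    rw [show l.length - 1 + 1 = l.length by omega, List.take_length]
    cases hfi : l.reverse.findIdx? (· == c) with
    | none => rfl
    | some k =>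
      obtain ⟨hk, -⟩ := List.findIdx?_eq_some_iff_findIdx_eq.mp hfi
      have hk' : k < l.length := by simpa using hk
      have h1 : 1 ≤ l.length := by omega
      show ((l.length - 1 : Nat) : Int) - (k : Int) = (l.length : Int) - 1 - (k : Int)
      omega

theorem rfind_eq_neg_one_iff_singleton (l : List Char) (c : Char) :
    (PySem.Chars.rfind l [c] = -1) ↔ c ∉ l := by
  rw [rfind_singleton]
  cases hfi : l.reverse.findIdx? (· == c) with
  | none =>
    simp only [iff_true_intro rfl, true_iff]
    have := List.findIdx?_isSome (xs := l.reverse) (p := (· == c))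
    rw [hfi] at this
    simp at this
    exact fun hc => this c hc rfl
  | some k =>
    obtain ⟨hk, -⟩ := List.findIdx?_eq_some_iff_findIdx_eq.mp hfi
    have hk' : k < l.length := by simpa using hk
    have hne : ¬ ((l.length : Int) - 1 - (k : Int) = -1) := by omega
    simp only [hne, false_iff, not_not]
    have : (l.reverse.findIdx? (· == c)).isSome = l.reverse.any (· == c) := List.findIdx?_isSome
    rw [hfi] at this
    simp at this
    simpa using this

theorem scanCharsA_spec (tc : String) (n : Int) (r : List Char) (k : Nat) :
    scanCharsA tc n (r.zipIdx k) =
      (r.findIdx? (fun ch => String.ofList [ch] == tc)).map (fun j => n - ((k : Int) + j)) := by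
  induction r generalizing k with
  | nil => simp [scanCharsA]
  | cons x t ih =>
    rw [List.zipIdx_cons]
    by_cases hx : String.ofList [x] = tc
    · simp [scanCharsA, hx, List.findIdx?_cons]
    · simp only [scanCharsA, if_neg hx, ih (k+1), List.findIdx?_cons, beq_iff_eq, if_neg hx,
        Option.map_map]
      cases hfi : t.findIdx? (fun ch => String.ofList [ch] == tc) <;> simp <;> push_cast <;> ring

theorem scanCharsA_eq_rfind (c : Char) (l : List Char) :
    scanCharsA (String.ofList [c]) (l.length : Int) l.reverse.zipIdx =
      (if PySem.Chars.rfind l [c] = -1 then none else some (PySem.Chars.rfind l [c] + 1)) := by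
  rw [scanCharsA_spec, rfind_singleton]
  have hpred : (fun ch => String.ofList [ch] == String.ofList [c]) = (fun ch => ch == c) := by
    funext ch
    by_cases h : ch = c
    · simp [h]
    · simp [h]
      intro he
      exact absurd (by simpa using congrArg String.toList he) h
  rw [hpred]
  cases hfi : l.reverse.findIdx? (· == c) with
  | none => rfl
  | some k =>
    obtain ⟨hk, -⟩ := List.findIdx?_eq_some_iff_findIdx_eq.mp hfi
    have hk' : k < l.length := by simpa using hk
    rw [if_neg (show ¬ ((l.length : Int) - 1 - (k : Int) = -1) by omega)]
    simp only [Option.bind_eq_bind, Option.map_some, Option.some.injEq, Option.bind_some,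
      Option.pure_def]
    push_cast
    ring

theorem nlPos_cons_nl (rest : List Char) (m : Nat) (h1 : 1 ≤ m) (h2 : m ≤ rest.count '\n' + 1)
    (hm1 : m ≠ 1) :
    (nlPos ('\n' :: rest)).getD (m - 1) 0 = (nlPos rest).getD (m - 2) 0 + 1 := by
  have hb : m - 2 < (nlPos rest).length := by rw [length_nlPos]; omega
  have hdef : nlPos ('\n' :: rest) = 0 :: (nlPos rest).map (· + 1) := by simp [nlPos]
  rw [hdef]
  have hm : m - 1 = (m - 2) + 1 := by omega
  rw [hm, List.getD_cons_succ]
  rw [List.getD_eq_getElem _ _ (by simpa using hb), List.getD_eq_getElem _ _ hb]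
  simp

theorem nlPos_cons_other (c : Char) (rest : List Char) (m : Nat) (hc : c ≠ '\n')
    (hb : m - 1 < rest.count '\n') :
    (nlPos (c :: rest)).getD (m - 1) 0 = (nlPos rest).getD (m - 1) 0 + 1 := by
  have hb' : m - 1 < (nlPos rest).length := by rw [length_nlPos]; omega
  have hdef : nlPos (c :: rest) = (nlPos rest).map (· + 1) := by simp [nlPos, hc]
  rw [hdef]
  rw [List.getD_eq_getElem _ _ (by simpa using hb'), List.getD_eq_getElem _ _ hb']
  simp

theorem getLast?_cons_ne {α : Type} (a : α) (l : List α) (h : l ≠ []) :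
    (a :: l).getLast? = l.getLast? := by
  cases l with
  | nil => exact absurd rfl h
  | cons b t => exact List.getLast?_cons_cons ..

theorem splitOnMax_go_spec (cs : List Char) (m : Nat) (fuel : Nat) (cur : List Char)
    (acc : List (List Char)) (hf : cs.length < fuel) (h1 : 1 ≤ m) (h2 : m ≤ cs.count '\n') :
    ∃ parts, PySem.Chars.splitOnMax.go ['\n'] fuel m cs cur acc = acc.reverse ++ parts ∧
      parts.length = m + 1 ∧
      parts.getLast? = some (cs.drop ((nlPos cs).getD (m - 1) 0 + 1)) := by
  induction cs generalizing m fuel cur acc with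
  | nil => simp at h2; omega
  | cons c rest ih =>
    cases fuel with
    | zero => simp at hf
    | succ f =>
      have hm0 : m ≠ 0 := by omega
      have hgo : PySem.Chars.splitOnMax.go ['\n'] (f+1) m (c :: rest) cur acc =
          if m = 0 then ((cur.reverse ++ (c :: rest)) :: acc).reverse
          else if ['\n'].isPrefixOf (c :: rest) then
            PySem.Chars.splitOnMax.go ['\n'] f (m-1) rest [] (cur.reverse :: acc)
          else PySem.Chars.splitOnMax.go ['\n'] f m rest (c :: cur) acc := by
        simp [PySem.Chars.splitOnMax.go]
      have hfr : rest.length < f := by simp at hf; omega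
      by_cases hc : c = '\n'
      · subst hc
        have hpre : (['\n'].isPrefixOf ('\n' :: rest)) = true := by simp [List.isPrefixOf]
        rw [hgo, if_neg hm0, if_pos hpre]
        by_cases hm1 : m = 1
        · subst hm1
          have hgo0 : PySem.Chars.splitOnMax.go ['\n'] f 0 rest [] (cur.reverse :: acc) =
              (cur.reverse :: acc).reverse ++ [rest] := by
            cases rest with
            | nil =>
              cases f with
              | zero => simp at hfr
              | succ f' => simp [PySem.Chars.splitOnMax.go]
            | cons y ys =>
              cases f with
              | zero => simp at hfr
              | succ f' => simp [PySem.Chars.splitOnMax.go]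
          rw [hgo0]
          refine ⟨[cur.reverse, rest], by simp, by simp, ?_⟩
          simp [nlPos]
        · have hm1' : 1 ≤ m - 1 := by omega
          have h2' : m - 1 ≤ rest.count '\n' := by
            simp [List.count_cons] at h2; omega
          obtain ⟨parts, hp, hlen, hlast⟩ := ih (m-1) f [] (cur.reverse :: acc) hfr hm1' h2'
          have hpne : parts ≠ [] := by intro h; rw [h] at hlen; simp at hlen
          refine ⟨cur.reverse :: parts, by simp [hp],
            by rw [List.length_cons, hlen]; omega, ?_⟩
          rw [getLast?_cons_ne _ _ hpne, hlast]
          rw [nlPos_cons_nl rest m h1 (by simp [List.count_cons] at h2; omega) hm1,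
            List.drop_succ_cons]
          have hmm : m - 1 - 1 = m - 2 := by omega
          rw [hmm]
      · have hpre : (['\n'].isPrefixOf (c :: rest)) = false := by
          simp [List.isPrefixOf]
          exact fun h => absurd h.symm hc
        rw [hgo, if_neg hm0, hpre]
        simp only [Bool.false_eq_true, if_false]
        have h2' : m ≤ rest.count '\n' := by
          simpa [List.count_cons, hc] using h2
        obtain ⟨parts, hp, hlen, hlast⟩ := ih m f (c :: cur) acc hfr h1 h2'
        refine ⟨parts, hp, hlen, ?_⟩
        rw [hlast, nlPos_cons_other c rest m hc (by omega), List.drop_succ_cons]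

theorem findnthA_eq (s : String) (L : Nat) (h1 : 1 ≤ L) (h2 : L ≤ s.toList.count '\n') :
    findnthA s "\n" ((L : Int) - 1) = ((nlPos s.toList).getD (L - 1) 0 : Int) := by
  have hmap := PySem.Str.splitMax?_map s "\n" ((L : Int) - 1 + 1)
  have hnl : ("\n" : String).toList = ['\n'] := by decide
  have hLL : (L : Int) - 1 + 1 = (L : Int) := by ring
  rw [hLL] at hmap
  have hchars : PySem.Chars.splitMax? s.toList "\n".toList (L : Int) =
      some (PySem.Chars.splitOnMax s.toList ['\n'] (L : Int)) := by
    rw [hnl]; rfl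
  obtain ⟨parts, hp, hlen, hlast⟩ :=
    splitOnMax_go_spec s.toList L (s.toList.length + 1) [] [] (by omega) h1 h2
  have hsom : PySem.Chars.splitOnMax s.toList ['\n'] (L : Int) = parts := by
    unfold PySem.Chars.splitOnMax
    rw [if_neg (by omega)]
    simpa using hp
  cases hs : PySem.Str.splitMax? s "\n" (L : Int) with
  | none =>
    rw [hs] at hmap; rw [hchars, hsom] at hmap; simp at hmap
  | some ps =>
    rw [hs] at hmap
    rw [hchars, hsom] at hmap
    simp only [Option.map_some, Option.some.injEq] at hmap
    have hpslen : ps.length = L + 1 := by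
      have := congrArg List.length hmap
      simpa [hlen] using this
    unfold findnthA
    rw [hLL, hs]
    show (if (ps.length : Int) ≤ (L : Int) then (-1 : Int)
        else PySem.Str.len s - PySem.Str.len (ps.getLastD "") - PySem.Str.len "\n") =
      ((nlPos s.toList).getD (L - 1) 0 : Int)
    rw [if_neg (by rw [hpslen]; push_cast; omega)]
    have hpsne : ps ≠ [] := by intro h; rw [h] at hpslen; simp at hpslen
    obtain ⟨x, hx⟩ : ∃ x, ps.getLast? = some x := by
      cases hq : ps.getLast? with
      | none => exact absurd (List.getLast?_eq_none_iff.mp hq) hpsne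
      | some x => exact ⟨x, rfl⟩
    have hxd : ps.getLastD "" = x := by rw [List.getLastD_eq_getLast?, hx]; rfl
    have hlast' : x.toList = s.toList.drop ((nlPos s.toList).getD (L-1) 0 + 1) := by
      have h1' : (ps.map String.toList).getLast? = some x.toList := by
        rw [List.getLast?_map, hx]; rfl
      rw [hmap, hlast] at h1'
      exact ((Option.some.injEq _ _ ▸ h1' : _) : List.drop _ _ = _).symm
    have hposlt : (nlPos s.toList).getD (L-1) 0 < s.toList.length := by
      apply nlPos_lt_length
      rw [length_nlPos]; omega
    rw [PySem.Str.len_eq, PySem.Str.len_eq, PySem.Str.len_eq, hxd, hlast', hnl,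
      List.length_drop, show (['\n'] : List Char).length = 1 from rfl]
    omega

theorem zipIdx_nl_filter (cs : List Char) (k : Nat) :
    ((cs.zipIdx k).filter (fun p => decide (p.1 = '\n'))).map (fun p => ((p.2 : Nat) : Int) + 1) =
      (nlPos cs).map (fun t => ((t + k : Nat) : Int) + 1) := by
  induction cs generalizing k with
  | nil => simp [nlPos]
  | cons c rest ih =>
    rw [List.zipIdx_cons]
    by_cases hc : c = '\n'
    · subst hc
      rw [List.filter_cons_of_pos (by simp), List.map_cons, ih (k+1)]
      have hdef : nlPos ('\n' :: rest) = 0 :: (nlPos rest).map (· + 1) := by simp [nlPos]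
      rw [hdef, List.map_cons, List.map_map]
      congr 1
      · simp
      · apply List.map_congr_left
        intro t _
        simp
        push_cast
        ring
    · rw [List.filter_cons_of_neg (by simp [hc]), ih (k+1)]
      have hdef : nlPos (c :: rest) = (nlPos rest).map (· + 1) := by simp [nlPos, hc]
      rw [hdef, List.map_map]
      apply List.map_congr_left
      intro t _
      simp
      push_cast
      ring

theorem offsets_spec (cs : List Char) :
    cs.zipIdx.foldl (fun acc p => if p.1 = '\n' then acc ++ [(p.2 : Int) + 1] else acc) [0] =
      0 :: (nlPos cs).map (fun t : Nat => (t : Int) + 1) := by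
  rw [PySem.List.foldl_append_ite (fun p : Char × Nat => p.1 = '\n')
    (fun p : Char × Nat => ((p.2 : Nat) : Int) + 1) cs.zipIdx [0]]
  rw [zipIdx_nl_filter cs 0, List.singleton_append]
  simp

theorem lcta_eq (text : String) (L : Nat) (col : Int) (hL : L ≤ text.toList.count '\n') :
    lineColumnToAbsoluteIndexA text (L : Int) col =
      (if L = 0 then 0 else ((nlPos text.toList).getD (L - 1) 0 : Int) + 1) + col := by
  unfold lineColumnToAbsoluteIndexA
  have hcnt : (PySem.Str.count text "\n" : Int) = (text.toList.count '\n' : Int) := by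
    rw [PySem.Str.count_eq, show ("\n" : String).toList = ['\n'] from by decide,
      count_singleton]
  rw [if_neg (by omega), hcnt, if_neg (by push_cast; omega)]
  by_cases h0 : L = 0
  · simp [h0]
  · rw [if_neg (by simpa using h0), if_neg h0, findnthA_eq text L (by omega) hL]

theorem stripA_toList (line : String) :
    (if PySem.Str.isIn "#" line then
        PySem.Str.slice line none (some (PySem.Str.find line "#")) else line).toList =
      pvStrip line.toList := by
  have hh : ("#" : String).toList = ['#'] := by decide
  have hiff : PySem.Str.isIn "#" line = true ↔ PySem.Chars.find line.toList ['#'] ≠ -1 := by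
    rw [PySem.Str.isIn_eq, hh, PySem.Chars.isIn_iff_infix, ← PySem.Chars.find_ne_neg_one_iff]
  by_cases h : PySem.Str.isIn "#" line = true
  · rw [if_pos h]
    have hf := hiff.mp h
    rw [PySem.Str.toList_slice, PySem.Str.find_eq, hh]
    have := strip_eq_pvStrip line.toList
    rw [if_pos hf] at this
    rw [← this, PySem.Chars.slice_eq_listSlice]
  · rw [if_neg h]
    have hf : ¬ (PySem.Chars.find line.toList ['#'] ≠ -1) := fun hc => h (hiff.mpr hc)
    have := strip_eq_pvStrip line.toList
    rw [if_neg hf] at this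
    exact this

-- B's comment strip, on toList

theorem stripB_toList (line : String) :
    (if PySem.Str.find line "#" ≠ -1 then
        PySem.Str.slice line none (some (PySem.Str.find line "#")) else line).toList =
      pvStrip line.toList := by
  have hh : ("#" : String).toList = ['#'] := by decide
  have heq : (PySem.Str.find line "#" ≠ -1) ↔ (PySem.Chars.find line.toList ['#'] ≠ -1) := by
    rw [PySem.Str.find_eq, hh]
  by_cases h : PySem.Str.find line "#" ≠ -1
  · rw [if_pos h]
    have hf := heq.mp h
    rw [PySem.Str.toList_slice, PySem.Str.find_eq, hh]
    have := strip_eq_pvStrip line.toList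
    rw [if_pos hf] at this
    rw [← this, PySem.Chars.slice_eq_listSlice]
  · rw [if_neg h]
    have hf : ¬ (PySem.Chars.find line.toList ['#'] ≠ -1) := fun hc => h (heq.mpr hc)
    have := strip_eq_pvStrip line.toList
    rw [if_neg hf] at this
    exact this

theorem pvMatches_iff_rfind (tc : String) (c : Char) (htc : tc.toList = [c]) (l : List Char) :
    pvMatches tc l = true ↔ PySem.Chars.rfind (pvStrip l) [c] ≠ -1 := by
  unfold pvMatches
  rw [htc]
  have hmem : ((pvStrip l).contains c = true) ↔ c ∈ pvStrip l := by
    simp [List.contains_iff_mem]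
  rw [hmem]
  constructor
  · intro h hr
    exact ((rfind_eq_neg_one_iff_singleton (pvStrip l) c).mp hr) h
  · intro h
    by_contra hc
    exact h ((rfind_eq_neg_one_iff_singleton (pvStrip l) c).mpr hc)

theorem scanLinesA_spec (T : String) (n : Int) (tc : String) (c : Char) (htc : tc.toList = [c])
    (rs : List String) (k : Nat) :
    scanLinesA T n tc (rs.zipIdx k) =
      (match rs.findIdx? (fun line => pvMatches tc line.toList) with
      | none => none
      | some j => some (lineColumnToAbsoluteIndexA T (n - ((k : Int) + (j : Int) + 1))
          (PySem.Chars.rfind (pvStrip ((rs.getD j "").toList)) [c] + 1))) := by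
  have htc' : tc = String.ofList [c] := by rw [← htc, String.ofList_toList]
  induction rs generalizing k with
  | nil => simp [scanLinesA]
  | cons r rest ih =>
    rw [List.zipIdx_cons]
    have hper : (scanCharsA tc
        (PySem.Str.len (if PySem.Str.isIn "#" r then
          PySem.Str.slice r none (some (PySem.Str.find r "#")) else r))
        (if PySem.Str.isIn "#" r then
          PySem.Str.slice r none (some (PySem.Str.find r "#")) else r).toList.reverse.zipIdx) =
        (if pvMatches tc r.toList = true then
          some (PySem.Chars.rfind (pvStrip r.toList) [c] + 1) else none) := by
      rw [PySem.Str.len_eq, stripA_toList r]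
      have hsc := scanCharsA_eq_rfind c (pvStrip r.toList)
      rw [← htc'] at hsc
      rw [hsc]
      by_cases hm : pvMatches tc r.toList = true
      · rw [if_pos hm, if_neg ((pvMatches_iff_rfind tc c htc r.toList).mp hm)]
      · rw [if_neg hm]
        have : PySem.Chars.rfind (pvStrip r.toList) [c] = -1 := by
          by_contra hr
          exact hm ((pvMatches_iff_rfind tc c htc r.toList).mpr hr)
        rw [if_pos this]
    show (let line' := if PySem.Str.isIn "#" r then
        PySem.Str.slice r none (some (PySem.Str.find r "#")) else r
      match scanCharsA tc (PySem.Str.len line') line'.toList.reverse.zipIdx with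
      | some col => some (lineColumnToAbsoluteIndexA T (n - ((k : Int) + 1)) col)
      | none => scanLinesA T n tc (rest.zipIdx (k+1))) = _
    simp only []
    rw [hper]
    by_cases hm : pvMatches tc r.toList = true
    · rw [if_pos hm]
      rw [List.findIdx?_cons, if_pos hm]
      simp only [List.getD_cons_zero]
      norm_num
    · rw [if_neg hm]
      rw [List.findIdx?_cons, if_neg (by simpa using hm)]
      rw [ih (k+1)]
      cases hfi : rest.findIdx? (fun line => pvMatches tc line.toList) with
      | none => simp
      | some j =>
        simp only [Option.map_some, List.getD_cons_succ]
        congr 2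
        push_cast
        ring

theorem zipIdx_filter_last {α : Type} [Inhabited α] (ss : List α) (q : α → Bool) :
    (match ss.reverse.findIdx? q with
      | none => (ss.zipIdx.filter (fun p => q p.1)) = []
      | some j => (ss.zipIdx.filter (fun p => q p.1)).getLast? =
          some (ss.getD (ss.length - 1 - j) default, ss.length - 1 - j)) := by
  induction ss using List.reverseRecOn with
  | nil => simp
  | append_singleton ds a ih =>
    rw [List.reverse_append, List.reverse_cons, List.reverse_nil, List.nil_append,
      List.singleton_append, List.findIdx?_cons]
    rw [List.zipIdx_append, List.filter_append]
    simp only [List.zipIdx_cons, List.zipIdx_nil, List.filter_cons, List.filter_nil,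
      Nat.zero_add]
    by_cases ha : q a = true
    · simp only [ha, if_true]
      rw [List.getLast?_append]
      simp only [List.getLast?_singleton, Option.some_or]
      rw [List.length_append, List.getD_eq_getElem?_getD]
      have hidx : ds.length + [a].length - 1 - 0 = ds.length := by simp
      rw [hidx, List.getElem?_append_right (by omega), Nat.sub_self]
      simp
    · simp only [ha, Bool.false_eq_true, if_false]
      cases hfi : ds.reverse.findIdx? q with
      | none =>
        have := ih
        rw [hfi] at this
        simp only [Option.map_none]
        rw [this]
        simp
      | some j =>
        obtain ⟨hjb, -⟩ := List.findIdx?_eq_some_iff_findIdx_eq.mp hfi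
        have hj : j < ds.length := by simpa using hjb
        have := ih
        rw [hfi] at this
        simp only [Option.map_some]
        rw [List.getLast?_append]
        simp only [List.getLast?_nil, Option.none_or]
        rw [this]
        have h1 : ds.length + [a].length - 1 - (j + 1) = ds.length - 1 - j := by simp; omega
        rw [List.length_append, h1,
          List.getD_append _ _ _ _ (by omega)]


-- per-pair value of B's scan loop (proof helper)
def pvBval (T : String) (c : Char) : String × Nat → Int := fun p =>
  PySem.List.pyGetD
    (T.toList.zipIdx.foldl
      (fun acc p => if p.1 = '\n' then acc ++ [(p.2 : Int) + 1] else acc) [0])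
    (p.2 : Int) 0 + PySem.Chars.rfind (pvStrip p.1.toList) [c] + 1

theorem foldl_overwrite_if {α β : Type} (l : List α) (q : α → Bool) (f : α → β)
    (init : Option β) :
    l.foldl (fun acc x => if q x = true then some (f x) else acc) init =
      match (l.filter q).getLast? with
      | some v => some (f v)
      | none => init := by
  induction l generalizing init with
  | nil => simp
  | cons x t ih =>
    rw [List.foldl_cons, ih]
    by_cases hx : q x = true
    · simp only [List.filter_cons, hx, if_true]
      cases hlast : (t.filter q).getLast? with
      | none =>
        have : t.filter q = [] := List.getLast?_eq_none_iff.mp hlast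
        simp [this]
      | some w =>
        have hne : t.filter q ≠ [] := by
          intro hnil; rw [hnil] at hlast; simp at hlast
        rw [show (x :: t.filter q).getLast? = (t.filter q).getLast? from by
          cases hq : t.filter q with
          | nil => exact absurd hq hne
          | cons a b => rw [List.getLast?_cons_cons]]
        rw [hlast]
    · simp only [List.filter_cons, hx, Bool.false_eq_true, if_false]

-- ===== VERDICT (by name: the statement is the Claim_ definition above) =====
theorem find_termination_spec : Claim_equal_find_termination := by
  intro lines sl sc tc hdom hpre
  obtain ⟨hne, hany, hcnt⟩ := hpre
  unfold Spec_find_termination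
  cases hlastc : (PySem.List.slice lines (some 0) (some (sl + 1))).getLast? with
  | none =>
    exfalso
    apply hne
    unfold pvScan
    rw [hlastc]
  | some lastLine =>
  set T := PySem.Str.join "" lines with hT
  set scan2 := (PySem.List.slice lines (some 0) (some (sl + 1))).dropLast ++
      [PySem.Str.slice lastLine none (some (sc + 1))] with hscan2
  have hscanmap : scan2.map String.toList = pvScan lines sl sc := by
    unfold pvScan
    rw [hlastc, hscan2]
    simp [PySem.Str.toList_slice]
  obtain ⟨c, htc⟩ : ∃ c, tc.toList = [c] := by
    obtain ⟨l0, hl0m, hl0⟩ := List.any_eq_true.mp hany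
    unfold pvMatches at hl0
    cases htcl : tc.toList with
    | nil => rw [htcl] at hl0; simp at hl0
    | cons c0 t =>
      cases t with
      | nil => exact ⟨c0, rfl⟩
      | cons d t2 => rw [htcl] at hl0; simp at hl0
  have hanyq : scan2.reverse.any (fun line => pvMatches tc line.toList) = true := by
    rw [List.any_reverse]
    have h1 := hany
    rw [← hscanmap, List.any_map] at h1
    exact h1
  obtain ⟨j, hfi⟩ : ∃ j, scan2.reverse.findIdx? (fun line => pvMatches tc line.toList) = some j := by
    have h2 := List.findIdx?_isSome (xs := scan2.reverse) (p := fun line => pvMatches tc line.toList)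
    rw [hanyq] at h2
    exact Option.isSome_iff_exists.mp h2
  obtain ⟨hjb, hjidx⟩ := List.findIdx?_eq_some_iff_findIdx_eq.mp hfi
  have hj : j < scan2.length := by simpa using hjb
  have hflat : T.toList = (lines.map String.toList).flatten := join_toList lines
  have hLcnt : scan2.length - 1 - j ≤ T.toList.count '\n' := by
    rw [hflat]
    have h3 : (pvScan lines sl sc).reverse.findIdx (pvMatches tc) = j := by
      rw [← hscanmap, ← List.map_reverse, List.findIdx_map]
      exact hjidx
    have h4 : (pvScan lines sl sc).length = scan2.length := by
      rw [← hscanmap]; simp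
    rw [h3, h4] at hcnt
    exact hcnt
  -- A side
  have hA : find_termination lines sl sc tc =
      (match scanLinesA T (scan2.length : Int) tc scan2.reverse.zipIdx with
       | some r => r | none => 0) := by
    unfold find_termination
    simp only [hlastc, ← hT, ← hscan2]
  have hgd : scan2.reverse.getD j "" = scan2.getD (scan2.length - 1 - j) "" := by
    rw [List.getD_eq_getElem?_getD, List.getD_eq_getElem?_getD,
      List.getElem?_reverse (by simpa using hjb)]
  have harith : (scan2.length : Int) - (((0 : Nat) : Int) + (j : Int) + 1) =
      ((scan2.length - 1 - j : Nat) : Int) := by push_cast; omega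
  have hAval : find_termination lines sl sc tc =
      (if (scan2.length - 1 - j : Nat) = 0 then 0
        else ((nlPos T.toList).getD ((scan2.length - 1 - j) - 1) 0 : Int) + 1) +
      (PySem.Chars.rfind (pvStrip ((scan2.getD (scan2.length - 1 - j) "").toList)) [c] + 1) := by
    rw [hA, scanLinesA_spec T (scan2.length : Int) tc c htc scan2.reverse 0, hfi]
    simp only []
    rw [harith, hgd, lcta_eq T (scan2.length - 1 - j)
      (PySem.Chars.rfind (pvStrip ((scan2.getD (scan2.length - 1 - j) "").toList)) [c] + 1) hLcnt]
  -- B side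
  have hB : find_termination_alt lines sl sc tc =
      (match scan2.zipIdx.foldl (fun best p =>
          let hpos := PySem.Str.find p.1 "#"
          let line := if hpos ≠ -1 then PySem.Str.slice p.1 none (some hpos) else p.1
          let pos := PySem.Str.rfind line tc
          if pos ≠ -1 then
            some (PySem.List.pyGetD
              (T.toList.zipIdx.foldl
                (fun acc p => if p.1 = '\n' then acc ++ [(p.2 : Int) + 1] else acc) [0])
              (p.2 : Int) 0 + pos + 1)
          else best) none with
        | some r => r | none => 0) := by
    unfold find_termination_alt
    simp only [hlastc, ← hT, ← hscan2]
  have hbody : (fun (best : Option Int) (p : String × Nat) =>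
      let hpos := PySem.Str.find p.1 "#"
      let line := if hpos ≠ -1 then PySem.Str.slice p.1 none (some hpos) else p.1
      let pos := PySem.Str.rfind line tc
      if pos ≠ -1 then
        some (PySem.List.pyGetD
          (T.toList.zipIdx.foldl
            (fun acc p => if p.1 = '\n' then acc ++ [(p.2 : Int) + 1] else acc) [0])
          (p.2 : Int) 0 + pos + 1)
      else best) =
      (fun best p => if (fun p : String × Nat => pvMatches tc p.1.toList) p = true then
        some (pvBval T c p) else best) := by
    funext best p
    simp only [pvBval]
    have hpos : PySem.Str.rfind
        (if PySem.Str.find p.1 "#" ≠ -1 then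
          PySem.Str.slice p.1 none (some (PySem.Str.find p.1 "#")) else p.1) tc =
        PySem.Chars.rfind (pvStrip p.1.toList) [c] := by
      rw [PySem.Str.rfind_eq, stripB_toList p.1, htc]
    rw [hpos]
    by_cases hm : pvMatches tc p.1.toList = true
    · rw [if_pos ((pvMatches_iff_rfind tc c htc p.1.toList).mp hm), if_pos hm]
    · have hrf : PySem.Chars.rfind (pvStrip p.1.toList) [c] = -1 := by
        by_contra hr
        exact hm ((pvMatches_iff_rfind tc c htc p.1.toList).mpr hr)
      rw [if_neg (by rw [hrf]; simp), if_neg hm]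
  have hzl := zipIdx_filter_last scan2 (fun line => pvMatches tc line.toList)
  rw [hfi] at hzl
  have hBval : find_termination_alt lines sl sc tc =
      PySem.List.pyGetD
        (T.toList.zipIdx.foldl
          (fun acc p => if p.1 = '\n' then acc ++ [(p.2 : Int) + 1] else acc) [0])
        ((scan2.length - 1 - j : Nat) : Int) 0 +
      PySem.Chars.rfind (pvStrip ((scan2.getD (scan2.length - 1 - j) "").toList)) [c] + 1 := by
    rw [hB, hbody, foldl_overwrite_if scan2.zipIdx
      (fun p : String × Nat => pvMatches tc p.1.toList) (pvBval T c) none]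
    simp only [] at hzl
    rw [hzl]
    simp only [pvBval]
    rfl
  have hoff : PySem.List.pyGetD
      (T.toList.zipIdx.foldl
        (fun acc p => if p.1 = '\n' then acc ++ [(p.2 : Int) + 1] else acc) [0])
      ((scan2.length - 1 - j : Nat) : Int) 0 =
      (if (scan2.length - 1 - j : Nat) = 0 then 0
        else ((nlPos T.toList).getD ((scan2.length - 1 - j) - 1) 0 : Int) + 1) := by
    rw [offsets_spec T.toList, PySem.List.pyGetD_natCast]
    cases hLc : (scan2.length - 1 - j : Nat) with
    | zero => simp
    | succ m =>
      rw [List.getD_cons_succ]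
      have hm : m < (nlPos T.toList).length := by
        rw [length_nlPos]
        omega
      rw [List.getD_eq_getElem?_getD, List.getD_eq_getElem?_getD, List.getElem?_map,
        List.getElem?_eq_getElem hm]
      simp [List.getElem?_eq_getElem hm]
  rw [hAval, hBval, hoff]
  ring
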